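-- pv_equiv track=rewrite | github.com/zcvfcat/programmers | 11장 자주 등장하는 자료 구조/기능개발_계산.py | solution
-- ===== SOURCE A (Python) =====
-- def solution(progresses, speeds):
--     answer = []
--
--     for progress, speed in zip(progresses, speeds):
--         left = -((progress - 100) // speed)
--         if not answer or answer[-1][0] < left:
--             answer.append([left, 1])
--         else:
--             answer[-1][1] += 1
--
--     return [ans[1] for ans in answer]
-- ===== SOURCE B (Python) =====
-- def solution(progresses, speeds):
--     days = [-((p - 100) // s) for p, s in zip(progresses, speeds)]
--     return _batches(days)
--
--
-- def _batches(days):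
--     # recursive batch splitting: the first element leads its batch; scan
--     # forward past every job finishing no later than the leader, emit the
--     # batch size, recurse on the remainder
--     if not days:
--         return []
--     k = 1
--     while k < len(days) and days[k] <= days[0]:
--         k += 1
--     return [k] + _batches(days[k:])
-- ===== Notes on version B (the rewrite author's own statement) =====
-- stated objective: alternative
-- what changed: Replaces A's single pass that mutates a growing answer list of [leader,count] pairs by a recursive batch-splitting: compute the days table once, then repeatedly scan forward past jobs finishing no later than the batch leader, emit that batch length and recurse on the remaining suffix.
import Mathlib
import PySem

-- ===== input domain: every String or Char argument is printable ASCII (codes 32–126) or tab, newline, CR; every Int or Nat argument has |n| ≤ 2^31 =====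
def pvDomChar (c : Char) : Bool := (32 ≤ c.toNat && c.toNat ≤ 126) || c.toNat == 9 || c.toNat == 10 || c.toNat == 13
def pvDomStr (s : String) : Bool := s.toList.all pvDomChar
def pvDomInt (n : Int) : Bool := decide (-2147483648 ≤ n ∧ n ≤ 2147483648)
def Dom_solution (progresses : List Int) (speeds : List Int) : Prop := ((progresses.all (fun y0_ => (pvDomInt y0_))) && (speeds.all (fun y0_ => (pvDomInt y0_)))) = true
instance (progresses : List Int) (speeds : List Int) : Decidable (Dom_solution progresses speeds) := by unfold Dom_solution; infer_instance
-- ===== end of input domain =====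

-- B replaces A's incremental mutation of a [leader,count] answer list by recursive batch-splitting over a precomputed days table (alternative decomposition, same cost).


-- ===== PORT A =====
-- one loop iteration: appends [left,1] or increments the last pair's count
def solutionStep (answer : List (Int × Int)) (ps : Int × Int) : List (Int × Int) :=
  let left := -(PySem.Int.floordiv (ps.1 - 100) ps.2)
  match answer.getLast? with
  | none => answer ++ [(left, 1)]
  | some last =>
      if last.1 < left then answer ++ [(left, 1)]
      else answer.dropLast ++ [(last.1, last.2 + 1)]

def solution (progresses : List Int) (speeds : List Int) : List Int :=
  ((List.zip progresses speeds).foldl solutionStep []).map (fun ans => ans.2)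

-- ===== PORT B =====
-- the inner 'while k < len(days) and days[k] <= days[0]' of _batches: how many
-- leading elements finish no later than the batch leader
def countLe (leader : Int) : List Int → Nat
  | [] => 0
  | x :: xs => if x ≤ leader then countLe leader xs + 1 else 0

-- _batches: emit the first batch's length, recurse on the remaining suffix
def batchesRec : List Int → List Int
  | [] => []
  | d :: ds =>
      let k := countLe d ds
      ((1 + k : Nat) : Int) :: batchesRec (ds.drop k)
termination_by l => l.length
decreasing_by simp [List.length_drop]

def solution_alt (progresses : List Int) (speeds : List Int) : List Int :=
  batchesRec ((List.zip progresses speeds).map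
    (fun ps => -(PySem.Int.floordiv (ps.1 - 100) ps.2)))

-- ===== PRECONDITION & SPEC =====
-- Pre_ excludes inputs where some zipped speed is 0: there Python's '//' raises ZeroDivisionError (in A and in B alike).
def Pre_solution (progresses : List Int) (speeds : List Int) : Prop :=
  ∀ ps ∈ List.zip progresses speeds, ps.2 ≠ 0
instance (progresses : List Int) (speeds : List Int) : Decidable (Pre_solution progresses speeds) := by unfold Pre_solution; infer_instance
def pvWitness_solution : List Int × List Int := ([93, 30, 55], [1, 30, 5])

def Spec_solution (progresses : List Int) (speeds : List Int) (out : List Int) : Prop := out = solution_alt progresses speeds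
instance (progresses : List Int) (speeds : List Int) (out : List Int) : Decidable (Spec_solution progresses speeds out) := by unfold Spec_solution; infer_instance

-- ===== CLAIM (what is proved, stated in full; the proofs are below) =====
def Claim_equal_solution : Prop := ∀ (progresses : List Int) (speeds : List Int), Dom_solution progresses speeds → Pre_solution progresses speeds → Spec_solution progresses speeds (solution progresses speeds)

-- ===== LEMMAS AND PROOFS =====

-- unfolding equations of batchesRec (its equation lemmas are guarded by the
-- termination argument, so we restate them for rewriting)
theorem batchesRec_nil : batchesRec [] = [] := by rw [batchesRec]
theorem batchesRec_cons (d : Int) (ds : List Int) :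
    batchesRec (d :: ds) = ((1 + countLe d ds : Nat) : Int) :: batchesRec (ds.drop (countLe d ds)) := by
  rw [batchesRec]

-- continuation of A's loop: current leader m, current count c, remaining day values
def contA (m c : Int) : List Int → List Int
  | [] => [c]
  | x :: xs => if m < x then c :: contA x 1 xs else contA m (c + 1) xs

-- the fold invariant: with answer = acc ++ [(m,c)], A's remaining loop produces
-- acc's counts followed by contA on the remaining day values
theorem fold_contA (rest : List (Int × Int)) :
    ∀ (acc : List (Int × Int)) (m c : Int),
    (rest.foldl solutionStep (acc ++ [(m, c)])).map (fun ans => ans.2)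
      = acc.map (fun ans => ans.2)
        ++ contA m c (rest.map (fun ps => -(PySem.Int.floordiv (ps.1 - 100) ps.2))) := by
  induction rest with
  | nil => intro acc m c; simp [contA]
  | cons x xs ih =>
      intro acc m c
      have hlast : (acc ++ [(m, c)]).getLast? = some (m, c) := by simp
      have hdrop : (acc ++ [(m, c)]).dropLast = acc := by simp
      by_cases h : m < -(PySem.Int.floordiv (x.1 - 100) x.2)
      · simp only [List.foldl_cons, solutionStep, hlast, List.map_cons,
          contA, if_pos h]
        rw [show acc ++ [(m, c)] ++ [(-(PySem.Int.floordiv (x.1 - 100) x.2), 1)]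
              = (acc ++ [(m, c)]) ++ [(-(PySem.Int.floordiv (x.1 - 100) x.2), 1)] from rfl,
            ih]
        simp
      · simp only [List.foldl_cons, solutionStep, hlast, hdrop, List.map_cons,
          contA, if_neg h, ih]

-- A's continuation is B's recursive batch split: contA consumes the ≤-leader
-- prefix into the current count and then starts a fresh batch
theorem contA_eq_batches (L : List Int) :
    ∀ (m c : Int), contA m c L = (c + (countLe m L : Int)) :: batchesRec (L.drop (countLe m L)) := by
  induction L with
  | nil => intro m c; simp [contA, countLe, batchesRec_nil]
  | cons x xs ih =>
      intro m c
      by_cases h : m < x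
      · have : (countLe m (x :: xs)) = 0 := by simp [countLe]; omega
        simp only [contA, if_pos h, this, List.drop_zero, ih x 1, batchesRec_cons]
        push_cast
        norm_num
      · have hk : countLe m (x :: xs) = countLe m xs + 1 := by
          simp [countLe]; omega
        simp only [contA, if_neg h, ih m (c + 1), hk, List.drop_succ_cons]
        congr 1
        push_cast; ring

-- ===== VERDICT (by name: the statement is the Claim_ definition above) =====
theorem solution_spec : Claim_equal_solution := by
  intro progresses speeds _ _
  unfold Spec_solution solution solution_alt
  cases h : List.zip progresses speeds with
  | nil => simp [batchesRec_nil]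
  | cons x xs =>
      simp only [List.map_cons]
      have hstep : solutionStep [] x = [] ++ [(-(PySem.Int.floordiv (x.1 - 100) x.2), 1)] := by
        simp [solutionStep]
      rw [List.foldl_cons, hstep,
        fold_contA xs [] (-(PySem.Int.floordiv (x.1 - 100) x.2)) 1,
        contA_eq_batches, batchesRec_cons]
      simp only [List.map_nil, List.nil_append]
      congr 1
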